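-- pv_equiv track=rewrite | github.com/981377660LMT/algorithm-study | 21_位运算/二进制枚举与三进制枚举/枚举子集/经典题/2044. 统计按位或能得到最大值的子集数目-不重复计算.py | countMaxOrSubsets2
-- ===== SOURCE A (Python) =====
-- from operator import or_
-- from functools import reduce, lru_cache
-- from typing import List
--
-- def countMaxOrSubsets2(nums: List[int]) -> int:
--     target = reduce(or_, nums)
--     xors = [0] * (1 << len(nums))
--     res = 0
--     # 时间复杂度为 O(1+2+4+...+2^(n-1)) = O(2^n)
--     for i, num in enumerate(nums):
--         for preState in range(1 << i):
--             cur = xors[preState] | num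
--             xors[preState | (1 << i)] = cur
--             if cur == target:
--                 res += 1
--
--     return res
-- ===== SOURCE B (Python) =====
-- from operator import or_
-- from functools import reduce
-- from typing import List
--
-- def countMaxOrSubsets2(nums: List[int]) -> int:
--     target = reduce(or_, nums)
--     n = len(nums)
--     res = 0
--     for mask in range(1, 1 << n):
--         cur = 0
--         for i in range(n):
--             if (mask >> i) & 1:
--                 cur |= nums[i]
--         if cur == target:
--             res += 1
--     return res
-- ===== Notes on version B (the rewrite author's own statement) =====
-- stated objective: simpler
-- what changed: B drops A's 2^n-entry DP table of subset ORs and instead enumerates each non-empty bitmask directly, recomputing its OR from the set bits; same O(2^n)-subset enumeration family but no auxiliary array and a plain mask loop.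
import Mathlib
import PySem

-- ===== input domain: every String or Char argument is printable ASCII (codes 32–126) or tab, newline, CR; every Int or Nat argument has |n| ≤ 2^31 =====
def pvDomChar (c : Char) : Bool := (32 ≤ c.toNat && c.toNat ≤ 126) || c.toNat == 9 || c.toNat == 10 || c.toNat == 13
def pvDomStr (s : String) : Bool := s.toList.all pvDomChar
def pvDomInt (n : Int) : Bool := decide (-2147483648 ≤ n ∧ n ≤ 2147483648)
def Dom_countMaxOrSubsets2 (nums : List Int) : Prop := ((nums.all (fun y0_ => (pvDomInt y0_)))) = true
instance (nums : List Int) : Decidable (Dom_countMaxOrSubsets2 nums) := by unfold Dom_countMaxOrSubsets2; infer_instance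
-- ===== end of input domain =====

-- B replaces A's 2^n-entry DP table of subset ORs by a direct loop over the non-empty bitmasks,
-- recomputing each subset's OR from the mask's set bits (objective: simpler, no auxiliary array).

-- ===== PORT A =====
-- reduce(or_, nums): left fold of | over nums; raises TypeError on [] (excluded by Pre_)
def pvReduceOr (nums : List Int) : Int :=
  match nums with
  | [] => 0
  | h :: t => t.foldl PySem.Int.bor h

def countMaxOrSubsets2 (nums : List Int) : Int :=
  let target := pvReduceOr nums
  let xors : List Int := List.replicate (2 ^ nums.length) 0
  let res : Int := 0
  -- for i, num in enumerate(nums): for preState in range(1 << i): …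
  let st :=
    (PySem.List.enumerate nums 0).foldl
      (fun (st : List Int × Int) (p : Int × Int) =>
        (PySem.List.pyRange 0 ((1 : Int) <<< p.1.toNat) 1).foldl
          (fun (st : List Int × Int) (preState : Int) =>
            let cur := PySem.Int.bor (PySem.List.pyGetD st.1 preState 0) p.2
            let xors' := PySem.List.pySetD st.1 (PySem.Int.bor preState ((1 : Int) <<< p.1.toNat)) cur
            (xors', if cur = target then st.2 + 1 else st.2))
          st)
      (xors, res)
  st.2

-- ===== PORT B =====
def countMaxOrSubsets2_alt (nums : List Int) : Int :=
  let target := pvReduceOr nums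
  let n := nums.length
  (PySem.List.pyRange 1 ((1 : Int) <<< n) 1).foldl
    (fun (res : Int) (mask : Int) =>
      let cur :=
        (PySem.List.pyRange 0 (n : Int) 1).foldl
          (fun (cur : Int) (i : Int) =>
            if PySem.Int.band (mask >>> i.toNat) 1 ≠ 0 then
              PySem.Int.bor cur (PySem.List.pyGetD nums i 0)
            else cur)
          0
      if cur = target then res + 1 else res)
    0

-- ===== PRECONDITION & SPEC =====
-- Pre_ excludes only the empty list, on which A's reduce(or_, nums) raises TypeError (B raises there too).
def Pre_countMaxOrSubsets2 (nums : List Int) : Prop := nums ≠ []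
instance (nums : List Int) : Decidable (Pre_countMaxOrSubsets2 nums) := by unfold Pre_countMaxOrSubsets2; infer_instance
def pvWitness_countMaxOrSubsets2 : List Int := [1, 2]

def Spec_countMaxOrSubsets2 (nums : List Int) (out : Int) : Prop := out = countMaxOrSubsets2_alt nums
instance (nums : List Int) (out : Int) : Decidable (Spec_countMaxOrSubsets2 nums out) := by unfold Spec_countMaxOrSubsets2; infer_instance

-- ===== CLAIM (what is proved, stated in full; the proofs are below) =====
def Claim_equal_countMaxOrSubsets2 : Prop := ∀ (nums : List Int), Dom_countMaxOrSubsets2 nums → Pre_countMaxOrSubsets2 nums → Spec_countMaxOrSubsets2 nums (countMaxOrSubsets2 nums)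

-- ===== LEMMAS AND PROOFS =====

-- OR of the subset of `nums` selected by the low bits of m (bit j ↔ element j), folded left from acc.
def orAcc (acc : Int) : List Int → Nat → Int
  | [], _ => acc
  | x :: xs, m => orAcc (if m % 2 = 1 then PySem.Int.bor acc x else acc) xs (m / 2)

theorem orAcc_mod (acc : Int) (xs : List Int) (m : Nat) :
    orAcc acc xs m = orAcc acc xs (m % 2 ^ xs.length) := by
  induction xs generalizing acc m with
  | nil => rfl
  | cons x xs ih =>
    have h2 : m % 2 ^ (xs.length + 1) % 2 = m % 2 :=
      Nat.mod_mod_of_dvd m ⟨2 ^ xs.length, by rw [pow_succ]; ring⟩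
    have hd : m % 2 ^ (xs.length + 1) / 2 = m / 2 % 2 ^ xs.length := by
      rw [Nat.pow_succ']
      have := Nat.mod_mul_right_div_self m 2 (2 ^ xs.length)
      omega
    simp only [orAcc, List.length_cons, h2, hd]
    rw [ih]

theorem orAcc_append (acc : Int) (xs ys : List Int) (m : Nat) :
    orAcc acc (xs ++ ys) m = orAcc (orAcc acc xs m) ys (m / 2 ^ xs.length) := by
  induction xs generalizing acc m with
  | nil => simp [orAcc]
  | cons x xs ih =>
    simp only [List.cons_append, orAcc, List.length_cons, ih]
    rw [Nat.div_div_eq_div_mul, ← Nat.pow_succ']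

theorem orAcc_low (acc : Int) (xs : List Int) (x : Int) (m : Nat) (h : m < 2 ^ xs.length) :
    orAcc acc (xs ++ [x]) m = orAcc acc xs m := by
  rw [orAcc_append, Nat.div_eq_of_lt h]
  simp [orAcc]

theorem orAcc_high (acc : Int) (xs : List Int) (x : Int) (m : Nat)
    (h1 : 2 ^ xs.length ≤ m) (h2 : m < 2 ^ (xs.length + 1)) :
    orAcc acc (xs ++ [x]) m = PySem.Int.bor (orAcc acc xs (m - 2 ^ xs.length)) x := by
  have hdiv : m / 2 ^ xs.length = 1 := by
    apply Nat.div_eq_of_lt_le (by simpa using h1) (by rw [pow_succ] at h2; omega)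
  rw [orAcc_append, hdiv]
  have : orAcc acc xs m = orAcc acc xs (m - 2 ^ xs.length) := by
    rw [orAcc_mod, Nat.mod_eq_sub_mod h1, Nat.mod_eq_of_lt (by rw [pow_succ] at h2; omega)]
  rw [this]; simp [orAcc]

theorem lorPow (p L : Nat) (h : p < 2 ^ L) : p ||| 2 ^ L = p + 2 ^ L := by
  have := (Nat.two_pow_add_eq_or_of_lt h 1).symm
  simp only [mul_one] at this
  rw [Nat.lor_comm] at this; omega

theorem getD_set (l : List Int) (n : Nat) (v : Int) (m : Nat) (h : n < l.length) :
    (l.set n v).getD m 0 = if m = n then v else l.getD m 0 := by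
  simp only [List.getD_eq_getElem?_getD, List.getElem?_set]
  by_cases hmn : m = n
  · subst hmn; simp [h]
  · simp [hmn, Ne.symm hmn]

theorem foldl_if_count (p : Nat → Prop) [DecidablePred p] (l : List Nat) (r : Int) :
    l.foldl (fun res k => if p k then res + 1 else res) r
      = r + ((l.countP fun k => decide (p k)) : Int) := by
  induction l generalizing r with
  | nil => simp
  | cons k l ih =>
    simp only [List.foldl_cons, List.countP_cons, ih]
    by_cases h : p k
    · simp [h]; ring
    · simp [h]

-- B's per-mask inner loop over enumerate, with starting index s: it computes orAcc acc xs (m >>> s).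
theorem enumFoldB (xs : List Int) (s m : Nat) (acc : Int) :
    (PySem.List.enumerate xs (s : Int)).foldl
      (fun cur (p : Int × Int) =>
        if PySem.Int.band ((m : Int) >>> p.1.toNat) 1 ≠ 0 then PySem.Int.bor cur p.2 else cur) acc
      = orAcc acc xs (m >>> s) := by
  induction xs generalizing s acc with
  | nil => simp [PySem.List.enumerate_nil, orAcc]
  | cons x xs ih =>
    rw [PySem.List.enumerate_cons, List.foldl_cons]
    have hc : ((s : Int), x).1.toNat = s := by simp
    have hsh : ((m : Int) >>> s) = ((m >>> s : Nat) : Int) := by simp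
    have hband : PySem.Int.band ((m >>> s : Nat) : Int) 1 = (((m >>> s) &&& 1 : Nat) : Int) := by
      rw [show (1 : Int) = ((1 : Nat) : Int) from rfl, PySem.Int.band_natCast]
    have hcond : (PySem.Int.band ((m : Int) >>> ((s : Int), x).1.toNat) 1 ≠ 0) ↔ ((m >>> s) % 2 = 1) := by
      rw [hc, hsh, hband]
      rw [Nat.and_one_is_mod]
      constructor
      · intro h; omega
      · intro h; omega
    have hs1 : ((s : Int) + 1) = ((s + 1 : Nat) : Int) := by push_cast; ring
    rw [hs1, ih]
    have hsr : m >>> (s + 1) = (m >>> s) / 2 := by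
      rw [Nat.shiftRight_add, Nat.shiftRight_one]
    show orAcc (if PySem.Int.band ((m : Int) >>> ((s : Int), x).1.toNat) 1 ≠ 0 then PySem.Int.bor acc x else acc) xs (m >>> (s + 1)) = orAcc acc (x :: xs) (m >>> s)
    rw [hsr]
    simp only [orAcc]
    congr 1
    simp only [hcond]

-- B's per-mask inner loop equals orAcc 0 nums m.
theorem bInner (nums : List Int) (m : Nat) :
    (PySem.List.pyRange 0 (nums.length : Int) 1).foldl
      (fun (cur : Int) (i : Int) =>
        if PySem.Int.band ((m : Int) >>> i.toNat) 1 ≠ 0 then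
          PySem.Int.bor cur (PySem.List.pyGetD nums i 0)
        else cur) 0
      = orAcc 0 nums m := by
  have h := enumFoldB nums 0 m 0
  rw [Nat.shiftRight_zero, Nat.cast_zero] at h
  rw [PySem.List.enumerate_eq_map_pyRange nums 0, List.foldl_map] at h
  simpa [PySem.List.len] using h

-- the body of A's outer loop (proof-side name for the lambda in the port)
def aOuterBody (target : Int) : List Int × Int → Int × Int → List Int × Int :=
  fun st p =>
    (PySem.List.pyRange 0 ((1 : Int) <<< p.1.toNat) 1).foldl
      (fun (st : List Int × Int) (preState : Int) =>
        let cur := PySem.Int.bor (PySem.List.pyGetD st.1 preState 0) p.2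
        let xors' := PySem.List.pySetD st.1 (PySem.Int.bor preState ((1 : Int) <<< p.1.toNat)) cur
        (xors', if cur = target then st.2 + 1 else st.2))
      st

theorem portA_eq (nums : List Int) :
    countMaxOrSubsets2 nums
      = ((PySem.List.enumerate nums 0).foldl (aOuterBody (pvReduceOr nums))
          (List.replicate (2 ^ nums.length) 0, 0)).2 := rfl

-- A's inner loop, one outer iteration at bit L with element x, first K steps.
theorem innerA (target x : Int) (L : Nat) (xors : List Int) (res : Int)
    (hlen : 2 ^ (L + 1) ≤ xors.length) (K : Nat) (hK : K ≤ 2 ^ L) :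
    let st := (List.range K).foldl
      (fun (st : List Int × Int) (k : Nat) =>
        let cur := PySem.Int.bor (PySem.List.pyGetD st.1 (k : Int) 0) x
        let xors' := PySem.List.pySetD st.1 (PySem.Int.bor (k : Int) ((1 : Int) <<< L)) cur
        (xors', if cur = target then st.2 + 1 else st.2)) (xors, res)
    st.1.length = xors.length ∧
    (∀ m : Nat, st.1.getD m 0
        = if 2 ^ L ≤ m ∧ m < 2 ^ L + K then PySem.Int.bor (xors.getD (m - 2 ^ L) 0) x
          else xors.getD m 0) ∧
    st.2 = res + ((List.range K).countP fun p => decide (PySem.Int.bor (xors.getD p 0) x = target)) := by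
  induction K with
  | zero => simp
  | succ K ih =>
    have hK' : K ≤ 2 ^ L := by omega
    obtain ⟨ih1, ih2, ih3⟩ := ih hK'
    rw [List.range_succ, List.foldl_append, List.foldl_cons, List.foldl_nil]
    set st := (List.range K).foldl
      (fun (st : List Int × Int) (k : Nat) =>
        let cur := PySem.Int.bor (PySem.List.pyGetD st.1 (k : Int) 0) x
        let xors' := PySem.List.pySetD st.1 (PySem.Int.bor (k : Int) ((1 : Int) <<< L)) cur
        (xors', if cur = target then st.2 + 1 else st.2)) (xors, res) with hst
    have hKlt : K < 2 ^ L := by omega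
    have hget : PySem.List.pyGetD st.1 (K : Int) 0 = xors.getD K 0 := by
      rw [PySem.List.pyGetD_natCast]
      rw [ih2 K]
      simp [Nat.not_le.mpr hKlt]
    have hsh : ((1 : Int) <<< L) = ((2 ^ L : Nat) : Int) := by simp [Int.shiftLeft_eq]
    have hbor : PySem.Int.bor (K : Int) ((1 : Int) <<< L) = ((K + 2 ^ L : Nat) : Int) := by
      rw [hsh, PySem.Int.bor_natCast, lorPow K L hKlt]
    have hset : PySem.List.pySetD st.1 (PySem.Int.bor (K : Int) ((1 : Int) <<< L))
          (PySem.Int.bor (PySem.List.pyGetD st.1 (K : Int) 0) x)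
        = st.1.set (K + 2 ^ L) (PySem.Int.bor (xors.getD K 0) x) := by
      rw [hbor, hget, PySem.List.pySetD_natCast]
    have hKin : K + 2 ^ L < st.1.length := by
      rw [ih1]
      have : 2 ^ (L + 1) = 2 ^ L + 2 ^ L := by rw [pow_succ]; ring
      omega
    refine ⟨?_, ?_, ?_⟩
    · simp only [hset, List.length_set, ih1]
    · intro m
      simp only [hset, getD_set st.1 (K + 2 ^ L) _ m hKin, ih2]
      by_cases hm : m = K + 2 ^ L
      · subst hm
        have : K + 2 ^ L - 2 ^ L = K := by omega
        simp [this]; omega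
      · by_cases hz : 2 ^ L ≤ m ∧ m < 2 ^ L + K
        · simp [hm, hz, And.intro hz.1 (by omega : m < 2 ^ L + (K + 1))]
        · have hz' : ¬ (2 ^ L ≤ m ∧ m < 2 ^ L + (K + 1)) := by omega
          simp [hm, hz, hz']
    · simp only [hget, ih3, List.range_succ, List.countP_append]
      simp only [List.countP_cons, List.countP_nil]
      split_ifs <;> simp_all <;> push_cast <;> ring

-- A's whole loop over a prefix xs (table of size 2^N): table = orAcc below 2^|xs|, counter counts masks.
theorem outerA (target : Int) (N : Nat) (xs : List Int) (hN : xs.length ≤ N) :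
    let st := (PySem.List.enumerate xs 0).foldl (aOuterBody target)
      (List.replicate (2 ^ N) (0 : Int), (0 : Int))
    st.1.length = 2 ^ N ∧
    (∀ m : Nat, st.1.getD m 0 = if m < 2 ^ xs.length then orAcc 0 xs m else 0) ∧
    st.2 = (((List.range (2 ^ xs.length)).countP
        fun m => decide (m ≠ 0) && decide (orAcc 0 xs m = target)) : Int) := by
  induction xs using List.reverseRecOn with
  | nil =>
    simp only [PySem.List.enumerate_nil, List.foldl_nil]
    refine ⟨by simp, ?_, ?_⟩
    · intro m
      simp only [List.getD_eq_getElem?_getD, List.getElem?_replicate, List.length_nil, pow_zero]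
      have : orAcc 0 [] m = 0 := rfl
      rw [this]
      split_ifs <;> simp
    · simp [List.range_one, orAcc]
  | append_singleton xs x ih =>
    have hN' : xs.length ≤ N := by simp at hN; omega
    obtain ⟨ih1, ih2, ih3⟩ := ih hN'
    simp only [PySem.List.enumerate_append, List.foldl_append, PySem.List.enumerate_cons,
      PySem.List.enumerate_nil, List.foldl_cons, List.foldl_nil, zero_add]
    set base := List.foldl (aOuterBody target) (List.replicate (2 ^ N) 0, 0)
      (PySem.List.enumerate xs) with hbase
    have hlen2 : 2 ^ (xs.length + 1) ≤ base.1.length := by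
      rw [ih1]
      exact Nat.pow_le_pow_right (by norm_num) (by simpa using hN)
    obtain ⟨j1, j2, j3⟩ := innerA target x xs.length base.1 base.2 hlen2 (2 ^ xs.length) (le_refl _)
    have hstep : aOuterBody target base ((xs.length : Int), x)
        = (List.range (2 ^ xs.length)).foldl
          (fun (st : List Int × Int) (k : Nat) =>
            let cur := PySem.Int.bor (PySem.List.pyGetD st.1 (k : Int) 0) x
            let xors' := PySem.List.pySetD st.1
              (PySem.Int.bor (k : Int) ((1 : Int) <<< xs.length)) cur
            (xors', if cur = target then st.2 + 1 else st.2)) (base.1, base.2) := by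
      unfold aOuterBody
      simp only [Int.toNat_natCast]
      rw [show ((1 : Int) <<< xs.length) = ((2 ^ xs.length : Nat) : Int) by simp [Int.shiftLeft_eq],
        PySem.List.pyRange_zero_nat, List.foldl_map]
    have hpow : 2 ^ (xs.length + 1) = 2 ^ xs.length + 2 ^ xs.length := by rw [pow_succ]; ring
    have hlapp : (xs ++ [x]).length = xs.length + 1 := by simp
    refine ⟨?_, ?_, ?_⟩
    · rw [hstep]; exact j1.trans ih1
    · intro m
      rw [hstep, j2 m, hlapp]
      by_cases h1 : 2 ^ xs.length ≤ m ∧ m < 2 ^ xs.length + 2 ^ xs.length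
      · rw [if_pos h1, ih2 (m - 2 ^ xs.length), if_pos (by omega : m - 2 ^ xs.length < 2 ^ xs.length),
          if_pos (by omega : m < 2 ^ (xs.length + 1)),
          orAcc_high 0 xs x m h1.1 (by omega)]
      · rw [if_neg h1, ih2 m]
        by_cases h2 : m < 2 ^ xs.length
        · rw [if_pos h2, if_pos (by omega : m < 2 ^ (xs.length + 1)), orAcc_low 0 xs x m h2]
        · rw [if_neg h2, if_neg (by omega : ¬ m < 2 ^ (xs.length + 1))]
    · rw [hstep, j3, ih3, hlapp]
      have c1 : List.countP (fun m => decide (m ≠ 0) && decide (orAcc 0 xs m = target))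
            (List.range (2 ^ xs.length))
          = List.countP (fun m => decide (m ≠ 0) && decide (orAcc 0 (xs ++ [x]) m = target))
            (List.range (2 ^ xs.length)) := by
        apply List.countP_congr
        intro p hp
        rw [orAcc_low 0 xs x p (List.mem_range.mp hp)]
      have c2 : List.countP (fun p => decide (PySem.Int.bor (base.1.getD p 0) x = target))
            (List.range (2 ^ xs.length))
          = List.countP (fun p => decide (orAcc 0 (xs ++ [x]) (2 ^ xs.length + p) = target))
            (List.range (2 ^ xs.length)) := by
        apply List.countP_congr
        intro p hp
        have hp' : p < 2 ^ xs.length := List.mem_range.mp hp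
        rw [ih2 p, if_pos hp',
          orAcc_high 0 xs x (2 ^ xs.length + p) (by omega) (by omega)]
        simp
      rw [c1, c2, hpow, List.range_add, List.countP_append, List.countP_map]
      have c3 : List.countP ((fun m => decide (m ≠ 0) && decide (orAcc 0 (xs ++ [x]) m = target)) ∘
            (fun k => 2 ^ xs.length + k)) (List.range (2 ^ xs.length))
          = List.countP (fun p => decide (orAcc 0 (xs ++ [x]) (2 ^ xs.length + p) = target))
            (List.range (2 ^ xs.length)) := by
        apply List.countP_congr
        intro p hp
        have hne : 2 ^ xs.length + p ≠ 0 := by positivity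
        simp [Function.comp]
      rw [c3]
      push_cast
      ring

theorem countEq (nums : List Int) (target : Int) :
    ((List.range (2 ^ nums.length)).countP
        fun m => decide (m ≠ 0) && decide (orAcc 0 nums m = target))
      = ((List.range (2 ^ nums.length - 1)).countP
        fun k => decide (orAcc 0 nums (1 + k) = target)) := by
  have h1 : 1 ≤ 2 ^ nums.length := Nat.one_le_two_pow
  rw [show 2 ^ nums.length = 1 + (2 ^ nums.length - 1) by omega, List.range_add,
    List.countP_append, List.countP_map, List.range_one]
  have c : List.countP ((fun m => decide (m ≠ 0) && decide (orAcc 0 nums m = target)) ∘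
        (fun k => 1 + k)) (List.range (2 ^ nums.length - 1))
      = List.countP (fun k => decide (orAcc 0 nums (1 + k) = target))
        (List.range (2 ^ nums.length - 1)) := by
    apply List.countP_congr
    intro p _
    simp [Function.comp]
  rw [c]
  simp

theorem portB_eq (nums : List Int) :
    countMaxOrSubsets2_alt nums
      = (((List.range (2 ^ nums.length - 1)).countP
          fun k => decide (orAcc 0 nums (1 + k) = pvReduceOr nums)) : Int) := by
  show (PySem.List.pyRange 1 ((1 : Int) <<< nums.length) 1).foldl
    (fun (res : Int) (mask : Int) =>
      if (PySem.List.pyRange 0 (nums.length : Int) 1).foldl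
          (fun (cur : Int) (i : Int) =>
            if PySem.Int.band (mask >>> i.toNat) 1 ≠ 0 then
              PySem.Int.bor cur (PySem.List.pyGetD nums i 0)
            else cur) 0 = pvReduceOr nums
      then res + 1 else res) 0 = _
  rw [show ((1 : Int) <<< nums.length) = ((2 ^ nums.length : Nat) : Int) by simp [Int.shiftLeft_eq]]
  rw [PySem.List.pyRange_one 1 ((2 ^ nums.length : Nat) : Int)]
  have ht : (((2 ^ nums.length : Nat) : Int) - 1).toNat = 2 ^ nums.length - 1 := by
    have : 1 ≤ 2 ^ nums.length := Nat.one_le_two_pow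
    omega
  rw [ht, List.foldl_map]
  rw [PySem.List.foldl_congr_mem _ _
    (fun (res : Int) (k : Nat) => if orAcc 0 nums (1 + k) = pvReduceOr nums then res + 1 else res) _
    ?_]
  · rw [foldl_if_count (fun k => orAcc 0 nums (1 + k) = pvReduceOr nums)]
    simp
  · intro res k _
    have hcast : ((1 : Int) + (k : Int)) = ((1 + k : Nat) : Int) := by push_cast; ring
    simp only [hcast, bInner nums (1 + k)]

theorem main_eq (nums : List Int) :
    countMaxOrSubsets2 nums = countMaxOrSubsets2_alt nums := by
  obtain ⟨_, _, h3⟩ := outerA (pvReduceOr nums) nums.length nums (le_refl _)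
  rw [portA_eq nums, h3, portB_eq nums, countEq]

-- ===== VERDICT (by name: the statement is the Claim_ definition above) =====
theorem countMaxOrSubsets2_spec : Claim_equal_countMaxOrSubsets2 := by
  intro nums _ _
  unfold Spec_countMaxOrSubsets2
  exact main_eq nums
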